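-- pv_equiv track=rewrite | github.com/effoT/codingbat-py | Array-3.py | maxMirror
-- ===== SOURCE A (Python) =====
-- def maxMirror(nums):
--     if not nums or nums == []:
--         return 0
--
--     def is_listA_in_listB(a, b):
--         for i in range(len(b)):
--             if a == b[i:i + len(a)]:
--                 return True
--         return False
--
--     # create a mirror to compare against
--     mirror_nums = nums[::-1]
--     max_counter = 0
--     for o in range(len(nums) + 1):
--         for i in range(len(nums) + 1):
--             if is_listA_in_listB(nums[o:i], mirror_nums) == True:
--                 if max_counter < len(nums[o:i]):
--                     max_counter = len(nums[o:i])
--     return max_counter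
-- ===== SOURCE B (Python) =====
-- # B: dynamic programming - longest common contiguous run of nums and reversed(nums),
-- # one O(n) row per suffix of nums instead of testing every slice for containment: O(n^2).
-- def maxMirror(nums):
--     rev = nums[::-1]
--     best = 0
--     row = [0] * len(rev)          # row for the empty suffix of nums
--     for x in reversed(nums):      # extend: row[j] = match length starting at (this suffix, rev[j:])
--         nxt = row[1:] + [0]
--         row = [(k + 1) if x == r else 0 for r, k in zip(rev, nxt)]
--         for v in row:
--             if v > best:
--                 best = v
--     return best
-- ===== Notes on version B (the rewrite author's own statement) =====
-- stated objective: faster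
-- what changed: Replaces the quadruple scan (every slice nums[o:i] tested for containment in the mirror by sliding comparison) with a longest-common-substring dynamic programme between nums and reversed(nums), keeping one O(n) row per suffix.
import Mathlib
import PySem

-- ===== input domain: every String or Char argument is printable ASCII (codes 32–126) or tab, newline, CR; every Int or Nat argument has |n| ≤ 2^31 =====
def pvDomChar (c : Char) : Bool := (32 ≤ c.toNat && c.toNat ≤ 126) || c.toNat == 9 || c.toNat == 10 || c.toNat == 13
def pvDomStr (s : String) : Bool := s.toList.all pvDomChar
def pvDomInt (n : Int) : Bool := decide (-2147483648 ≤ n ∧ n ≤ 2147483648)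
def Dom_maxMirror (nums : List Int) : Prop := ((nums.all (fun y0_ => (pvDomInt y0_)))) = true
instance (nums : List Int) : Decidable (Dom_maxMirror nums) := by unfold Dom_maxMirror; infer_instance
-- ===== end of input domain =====

-- B replaces A's O(n^4) test of every slice for containment in the mirror with an
-- O(n^2) longest-common-substring dynamic programme between nums and reversed(nums).

-- ===== PORT A =====
-- helper is_listA_in_listB: 'for i in range(len(b)): if a == b[i:i+len(a)]: return True / return False'
def pyIsIn (a b : List Int) : Bool :=
  (PySem.List.pyRange 0 (b.length : Int) 1).any
    (fun i => a == PySem.List.slice b (some i) (some (i + (a.length : Int))))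

def maxMirror (nums : List Int) : Int :=
  if nums = [] then 0   -- 'if not nums or nums == []' (the two tests coincide)
  else
    let mirror := nums.reverse  -- nums[::-1]  (PySem.List.slice?_none_none_neg_one)
    (PySem.List.pyRange 0 ((nums.length : Int) + 1) 1).foldl (fun mc o =>
      (PySem.List.pyRange 0 ((nums.length : Int) + 1) 1).foldl (fun mc i =>
        if pyIsIn (PySem.List.slice nums (some o) (some i)) mirror = true then
          (if mc < ((PySem.List.slice nums (some o) (some i)).length : Int) then
            ((PySem.List.slice nums (some o) (some i)).length : Int) else mc)
        else mc) mc) 0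

-- ===== PORT B =====
-- one loop iteration: next DP row from the previous one, then fold the row into best
def stepB (rev : List Int) (st : List Int × Int) (x : Int) : List Int × Int :=
  let nxt := st.1.tail ++ [0]                                   -- row[1:] + [0]
  let row := (rev.zip nxt).map (fun p => if x == p.1 then p.2 + 1 else 0)
  (row, row.foldl (fun b v => if v > b then v else b) st.2)     -- for v in row: if v > best: ...

def maxMirror_alt (nums : List Int) : Int :=
  let rev := nums.reverse                                       -- nums[::-1]
  (nums.reverse.foldl (stepB rev) (List.replicate rev.length 0, 0)).2

-- ===== PRECONDITION & SPEC =====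
def Spec_maxMirror (nums : List Int) (out : Int) : Prop := out = maxMirror_alt nums
instance (nums : List Int) (out : Int) : Decidable (Spec_maxMirror nums out) := by unfold Spec_maxMirror; infer_instance

-- ===== CLAIM (what is proved, stated in full; the proofs are below) =====
def Claim_equal_maxMirror : Prop := ∀ (nums : List Int), Dom_maxMirror nums → Spec_maxMirror nums (maxMirror nums)

-- ===== LEMMAS AND PROOFS =====

-- common-prefix length of two lists
def cplN : List Int → List Int → Nat
  | x :: xs, y :: ys => if x = y then cplN xs ys + 1 else 0
  | _, _ => 0

-- nonempty suffixes, longest first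
def tailsNE : List Int → List (List Int)
  | [] => []
  | x :: xs => (x :: xs) :: tailsNE xs

-- the DP row for suffix s: match lengths against every nonempty suffix of rev
def rowFor (rev s : List Int) : List Int := (tailsNE rev).map (fun t => (cplN s t : Int))

lemma mem_tailsNE (t l : List Int) : t ∈ tailsNE l ↔ t <:+ l ∧ t ≠ [] := by
  induction l with
  | nil => simp [tailsNE]
  | cons x xs ih =>
    simp only [tailsNE, List.mem_cons, ih, List.suffix_cons_iff]
    constructor
    · rintro (rfl | ⟨h1, h2⟩)
      · exact ⟨Or.inl rfl, by simp⟩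
      · exact ⟨Or.inr h1, h2⟩
    · rintro ⟨h1 | h1, h2⟩
      · exact Or.inl h1
      · exact Or.inr ⟨h1, h2⟩

lemma cplN_le_left : ∀ s t : List Int, cplN s t ≤ s.length := by
  intro s
  induction s with
  | nil => intro t; cases t <;> simp [cplN]
  | cons x xs ih =>
    intro t
    cases t with
    | nil => simp [cplN]
    | cons y ys =>
      simp only [cplN, List.length_cons]
      split
      · have := ih ys; omega
      · omega

lemma take_cplN_eq : ∀ s t : List Int, s.take (cplN s t) = t.take (cplN s t) := by
  intro s
  induction s with
  | nil => intro t; cases t <;> simp [cplN]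
  | cons x xs ih =>
    intro t
    cases t with
    | nil => simp [cplN]
    | cons y ys =>
      simp only [cplN]
      split
      · next h => simp [h, ih ys]
      · simp

lemma le_cplN_of_prefix : ∀ p s t : List Int, p <+: s → p <+: t → p.length ≤ cplN s t := by
  intro p
  induction p with
  | nil => simp
  | cons a p ih =>
    intro s t hs ht
    cases s with
    | nil => simpa using hs.length_le
    | cons b s =>
      cases t with
      | nil => simpa using ht.length_le
      | cons c t =>
        rw [List.cons_prefix_cons] at hs ht
        obtain ⟨rfl, hs⟩ := hs
        obtain ⟨rfl, ht⟩ := ht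
        have hc : cplN (a :: s) (a :: t) = cplN s t + 1 := by simp [cplN]
        have := ih s t hs ht
        simp only [List.length_cons, hc]
        omega

-- rows -------------------------------------------------------------------

lemma rowFor_nil (rev : List Int) : rowFor rev [] = List.replicate rev.length 0 := by
  induction rev with
  | nil => simp [rowFor, tailsNE]
  | cons r rs ih =>
    have : cplN [] (r :: rs) = 0 := by simp [cplN]
    simp [rowFor, tailsNE, this, List.replicate_succ] at *
    exact ih

lemma rowFor_tail (rev s : List Int) : (rowFor rev s).tail = rowFor rev.tail s := by
  cases rev <;> simp [rowFor, tailsNE]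

lemma rowFor_step (x : Int) (s : List Int) :
    ∀ rev : List Int,
      (rev.zip (rowFor rev.tail s ++ [0])).map (fun p => if x == p.1 then p.2 + 1 else 0)
        = rowFor rev (x :: s) := by
  intro rev
  induction rev with
  | nil => simp [rowFor, tailsNE]
  | cons r rs ih =>
    cases rs with
    | nil =>
      simp only [rowFor, tailsNE, List.tail_cons, List.map_nil, List.nil_append,
        List.map_cons, List.zip_cons_cons, List.zip_nil_right, cplN]
      by_cases h : x = r <;> simp [h]
    | cons r' rs' =>
      simp only [List.tail_cons] at ih ⊢
      have hrF : rowFor (r' :: rs') s = (cplN s (r' :: rs') : Int) :: rowFor rs' s := by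
        simp [rowFor, tailsNE]
      rw [hrF]
      simp only [List.cons_append, List.zip_cons_cons, List.map_cons]
      rw [ih]
      have : rowFor (r :: r' :: rs') (x :: s)
          = (cplN (x :: s) (r :: r' :: rs') : Int) :: rowFor (r' :: rs') (x :: s) := by
        simp [rowFor, tailsNE]
      rw [this]
      congr 1
      by_cases h : x = r <;> simp [h, cplN]

-- generic fold bounds ------------------------------------------------------

lemma foldl_ge_init {α : Type} (u : Int → α → Int) (h : ∀ m x, m ≤ u m x) :
    ∀ (l : List α) (m : Int), m ≤ List.foldl u m l := by
  intro l
  induction l with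
  | nil => simp
  | cons a l ih => intro m; exact le_trans (h m a) (ih (u m a))

lemma foldl_le_of {α : Type} (u : Int → α → Int) (C : Int) :
    ∀ (l : List α) (m : Int), m ≤ C → (∀ x ∈ l, ∀ m', m' ≤ C → u m' x ≤ C) →
      List.foldl u m l ≤ C := by
  intro l
  induction l with
  | nil => intro m hm _; simpa using hm
  | cons a l ih =>
    intro m hm h
    exact ih (u m a) (h a (by simp) m hm) (fun x hx => h x (by simp [hx]))

lemma foldl_ge_of_mem {α : Type} (u : Int → α → Int) (h : ∀ m x, m ≤ u m x)
    (x : α) (v : Int) (hx : ∀ m, v ≤ u m x) :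
    ∀ (l : List α) (m : Int), x ∈ l → v ≤ List.foldl u m l := by
  intro l
  induction l with
  | nil => simp
  | cons a l ih =>
    intro m hm
    rcases List.mem_cons.mp hm with rfl | hm
    · exact le_trans (hx m) (foldl_ge_init u h l (u m x))
    · exact ih (u m a) hm

-- B-side characterisation ---------------------------------------------------

lemma stepB_snd_mono (rev : List Int) (st : List Int × Int) (x : Int) :
    st.2 ≤ (stepB rev st x).2 := by
  refine foldl_ge_init _ (fun m v => ?_) _ st.2
  split <;> omega

lemma foldB_snd_mono (rev : List Int) :
    ∀ (l : List Int) (st : List Int × Int), st.2 ≤ (List.foldl (stepB rev) st l).2 := by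
  intro l
  induction l with
  | nil => intro st; simp
  | cons a l ih =>
    intro st
    exact le_trans (stepB_snd_mono rev st a) (ih (stepB rev st a))

lemma stepB_rowFor (rev s : List Int) (x : Int) (best : Int) :
    stepB rev (rowFor rev s, best) x
      = (rowFor rev (x :: s),
         (rowFor rev (x :: s)).foldl (fun b v => if v > b then v else b) best) := by
  have h := rowFor_step x s rev
  simp only [stepB, rowFor_tail, h]

lemma suffix_eq_of_length {l₁ l₂ L : List Int} (h1 : l₁ <:+ L) (h2 : l₂ <:+ L)
    (h : l₁.length = l₂.length) : l₁ = l₂ := by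
  obtain ⟨p1, rfl⟩ := h1
  obtain ⟨p2, hp⟩ := h2
  have hl : p1.length = p2.length := by
    have := congrArg List.length hp
    simp at this; omega
  have := congrArg (List.drop p1.length) hp
  rw [List.drop_left, hl, List.drop_left] at this
  exact this.symm

lemma foldB_ge (rev : List Int) :
    ∀ (l s : List Int) (best : Int) (s0 t : List Int),
      s0 <:+ (l.reverse ++ s) → s.length < s0.length → t <:+ rev → t ≠ [] →
      (cplN s0 t : Int) ≤ (List.foldl (stepB rev) (rowFor rev s, best) l).2 := by
  intro l
  induction l with
  | nil =>
    intro s best s0 t hs0 hlen _ _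
    simp at hs0
    exact absurd hs0.length_le (by omega)
  | cons x l ih =>
    intro s best s0 t hs0 hlen ht htne
    have hL : (x :: l).reverse ++ s = l.reverse ++ (x :: s) := by simp
    rw [hL] at hs0
    rw [List.foldl_cons, stepB_rowFor]
    by_cases hgt : (x :: s).length < s0.length
    · exact ih (x :: s) _ s0 t hs0 hgt ht htne
    · have hlen' : s0.length = (x :: s).length := by simp at hgt ⊢; omega
      have hxs : s0 = x :: s :=
        suffix_eq_of_length hs0 (List.suffix_append _ _) hlen'
      have hmem : (cplN s0 t : Int) ∈ rowFor rev (x :: s) := by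
        rw [← hxs, rowFor]
        exact List.mem_map_of_mem ((mem_tailsNE t rev).mpr ⟨ht, htne⟩)
      have h1 : (cplN s0 t : Int) ≤
          (rowFor rev (x :: s)).foldl (fun b v => if v > b then v else b) best :=
        foldl_ge_of_mem _ (fun m v => by split <;> omega) _ _
          (fun m => by split <;> omega) _ _ hmem
      exact le_trans h1 (foldB_snd_mono rev l _)

lemma foldB_le (rev : List Int) (C : Int) :
    ∀ (l s : List Int) (best : Int), best ≤ C →
      (∀ s0 t : List Int, s0 <:+ (l.reverse ++ s) → s.length < s0.length →
        t <:+ rev → t ≠ [] → (cplN s0 t : Int) ≤ C) →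
      (List.foldl (stepB rev) (rowFor rev s, best) l).2 ≤ C := by
  intro l
  induction l with
  | nil => intro s best hb _; simpa using hb
  | cons x l ih =>
    intro s best hb h
    have hL : (x :: l).reverse ++ s = l.reverse ++ (x :: s) := by simp
    rw [List.foldl_cons, stepB_rowFor]
    refine ih (x :: s) _ ?_ ?_
    · refine foldl_le_of _ _ _ _ hb ?_
      intro v hv m' hm'
      have hvC : v ≤ C := by
        rw [rowFor] at hv
        obtain ⟨t, htm, rfl⟩ := List.mem_map.mp hv
        obtain ⟨ht, htne⟩ := (mem_tailsNE t rev).mp htm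
        exact h (x :: s) t (by rw [hL]; exact List.suffix_append _ _) (by simp) ht htne
      split <;> omega
    · intro s0 t hs0 hlen ht htne
      refine h s0 t (by rw [hL]; exact hs0) (by simp at hlen ⊢; omega) ht htne

lemma alt_nonneg (nums : List Int) : 0 ≤ maxMirror_alt nums := by
  simpa [maxMirror_alt] using foldB_snd_mono nums.reverse nums.reverse
    (List.replicate nums.reverse.length 0, 0)

lemma alt_ge (nums s0 t : List Int) (hs0 : s0 <:+ nums) (hs0ne : s0 ≠ [])
    (ht : t <:+ nums.reverse) (htne : t ≠ []) :
    (cplN s0 t : Int) ≤ maxMirror_alt nums := by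
  have h := foldB_ge nums.reverse nums.reverse [] 0 s0 t (by simpa using hs0)
    (by cases s0 <;> simp_all) ht htne
  rw [rowFor_nil] at h
  simpa [maxMirror_alt] using h

lemma alt_le (nums : List Int) (C : Int) (hC : 0 ≤ C)
    (h : ∀ s0 t : List Int, s0 <:+ nums → s0 ≠ [] → t <:+ nums.reverse → t ≠ [] →
      (cplN s0 t : Int) ≤ C) :
    maxMirror_alt nums ≤ C := by
  have hh := foldB_le nums.reverse C nums.reverse [] 0 hC ?_
  · rw [rowFor_nil] at hh
    simpa [maxMirror_alt] using hh
  · intro s0 t hs0 hlen ht htne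
    exact h s0 t (by simpa using hs0) (by cases s0 <;> simp_all) ht htne

-- A-side characterisation ----------------------------------------------------

lemma pyIsIn_iff (a b : List Int) :
    pyIsIn a b = true ↔ ∃ j : Nat, j < b.length ∧ a <+: b.drop j := by
  unfold pyIsIn
  rw [List.any_eq_true]
  constructor
  · rintro ⟨i, hi, hc⟩
    rw [PySem.List.mem_pyRange_one] at hi
    obtain ⟨h0, hlt⟩ := hi
    refine ⟨i.toNat, by omega, ?_⟩
    rw [beq_iff_eq] at hc
    rw [show i = ((i.toNat : Nat) : Int) by omega, PySem.List.slice_natCast_add] at hc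
    exact List.prefix_iff_eq_take.mpr hc
  · rintro ⟨j, hj, hpre⟩
    refine ⟨(j : Int), ?_, ?_⟩
    · rw [PySem.List.mem_pyRange_one]
      omega
    · rw [beq_iff_eq, PySem.List.slice_natCast_add]
      exact List.prefix_iff_eq_take.mp hpre

lemma a_nonneg (nums : List Int) : 0 ≤ maxMirror nums := by
  unfold maxMirror
  split
  · simp
  · refine foldl_ge_init _ (fun m o => ?_) _ 0
    refine foldl_ge_init _ (fun m i => ?_) _ m
    split
    · split <;> omega
    · omega

lemma a_ge (nums : List Int) (hne : ¬ nums = []) (o i : Int)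
    (ho : o ∈ PySem.List.pyRange 0 ((nums.length : Int) + 1) 1)
    (hi : i ∈ PySem.List.pyRange 0 ((nums.length : Int) + 1) 1)
    (hin : pyIsIn (PySem.List.slice nums (some o) (some i)) nums.reverse = true) :
    ((PySem.List.slice nums (some o) (some i)).length : Int) ≤ maxMirror nums := by
  unfold maxMirror
  rw [if_neg hne]
  refine foldl_ge_of_mem _ ?_ o _ ?_ _ _ ho
  · intro m x
    refine foldl_ge_init _ (fun m i => ?_) _ m
    split
    · split <;> omega
    · omega
  · intro m
    refine foldl_ge_of_mem _ ?_ i _ ?_ _ _ hi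
    · intro m x
      split
      · split <;> omega
      · omega
    · intro m
      rw [if_pos hin]
      split <;> omega

lemma a_le (nums : List Int) (hne : ¬ nums = []) (C : Int) (hC : 0 ≤ C)
    (h : ∀ o i : Int, o ∈ PySem.List.pyRange 0 ((nums.length : Int) + 1) 1 →
      i ∈ PySem.List.pyRange 0 ((nums.length : Int) + 1) 1 →
      pyIsIn (PySem.List.slice nums (some o) (some i)) nums.reverse = true →
      ((PySem.List.slice nums (some o) (some i)).length : Int) ≤ C) :
    maxMirror nums ≤ C := by
  unfold maxMirror
  rw [if_neg hne]
  refine foldl_le_of _ _ _ _ hC ?_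
  intro o hom m hm
  refine foldl_le_of _ _ _ _ hm ?_
  intro i him m' hm'
  split
  · next hin =>
    split
    · exact h o i hom him hin
    · exact hm'
  · exact hm'

-- suffixes as drops ----------------------------------------------------------

lemma suffix_drop_form {t L : List Int} (ht : t <:+ L) :
    t = L.drop (L.length - t.length) := by
  obtain ⟨p, rfl⟩ := ht
  simp

-- main bridge ----------------------------------------------------------------

lemma main_eq (nums : List Int) : maxMirror nums = maxMirror_alt nums := by
  by_cases hne : nums = []
  · subst hne; decide
  refine le_antisymm ?_ ?_
  · -- A ≤ B
    refine a_le nums hne _ (alt_nonneg nums) ?_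
    intro o i hom him hin
    set a := PySem.List.slice nums (some o) (some i) with ha
    by_cases haz : a = []
    · rw [haz]; simpa using alt_nonneg nums
    · obtain ⟨j, hj, hpre⟩ := (pyIsIn_iff a nums.reverse).mp hin
      rw [PySem.List.mem_pyRange_one] at hom
      have hsl : a = (nums.drop o.toNat).take (i.toNat - o.toNat) := by
        rw [ha]
        exact PySem.List.slice_toNat nums hom.1 (by
          rw [PySem.List.mem_pyRange_one] at him; exact him.1)
      have hpre0 : a <+: nums.drop o.toNat := by
        rw [hsl]; exact List.take_prefix _ _
      have hs0ne : nums.drop o.toNat ≠ [] := by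
        intro hnil; rw [hnil] at hpre0
        exact haz (List.prefix_nil.mp hpre0)
      have hj' : j < nums.length := by simpa using hj
      have htne : nums.reverse.drop j ≠ [] := by
        simp [List.drop_eq_nil_iff]
        omega
      have hk : (a.length : Int) ≤ (cplN (nums.drop o.toNat) (nums.reverse.drop j) : Int) := by
        exact_mod_cast le_cplN_of_prefix a _ _ hpre0 hpre
      exact le_trans hk (alt_ge nums _ _ (List.drop_suffix _ _) hs0ne
        (List.drop_suffix _ _) htne)
  · -- B ≤ A
    refine alt_le nums _ (a_nonneg nums) ?_
    intro s0 t hs0 hs0ne ht htne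
    set k := cplN s0 t with hk
    set o := nums.length - s0.length with hodef
    have hs0d : s0 = nums.drop o := suffix_drop_form hs0
    have hs0len : s0.length = nums.length - o := by
      rw [hs0d]; simp
    have hkle : k ≤ s0.length := cplN_le_left s0 t
    have hp : s0.take k = t.take k := take_cplN_eq s0 t
    -- the common slice is nums[o : o+k]
    have hslice : PySem.List.slice nums (some (o : Int)) (some ((o : Int) + (k : Int)))
        = s0.take k := by
      rw [PySem.List.slice_natCast_add, ← hs0d]
    have hlen_take : (s0.take k).length = k := by
      simp [List.length_take]; omega
    -- it occurs in the mirror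
    have hin : pyIsIn (PySem.List.slice nums (some (o : Int))
        (some ((o : Int) + (k : Int)))) nums.reverse = true := by
      rw [pyIsIn_iff]
      refine ⟨nums.reverse.length - t.length, ?_, ?_⟩
      · have h2 := ht.length_le
        have ht1 : 0 < t.length := List.length_pos_iff.mpr htne
        simp only [List.length_reverse] at h2 ⊢
        omega
      · rw [← suffix_drop_form ht, hslice, hp]
        exact List.take_prefix _ _
    have hole : o ≤ nums.length := by omega
    have hrange_o : (o : Int) ∈ PySem.List.pyRange 0 ((nums.length : Int) + 1) 1 := by
      rw [PySem.List.mem_pyRange_one]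
      omega
    have hrange_i : ((o : Int) + (k : Int)) ∈
        PySem.List.pyRange 0 ((nums.length : Int) + 1) 1 := by
      rw [PySem.List.mem_pyRange_one]
      have : o + k ≤ nums.length := by omega
      omega
    have := a_ge nums hne (o : Int) ((o : Int) + (k : Int)) hrange_o hrange_i hin
    rw [hslice, hlen_take] at this
    exact this

-- ===== VERDICT (by name: the statement is the Claim_ definition above) =====
theorem maxMirror_spec : Claim_equal_maxMirror := by
  intro nums _
  unfold Spec_maxMirror
  exact main_eq nums
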